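-- pv_equiv track=rewrite | github.com/d33panpaudel07/allSemesterCodes | 4th_Semester/Artificial Intelligence/labWorks/lab 4/pythonProject/sourceCodes/ruleBasedSystems/q1_weather_forecasting.py | weather_forecast
-- ===== SOURCE A (Python) =====
-- def weather_forecast(sky, temperature, wind):
--     rules = {
--         ("cloudy", None, "none"): "It might rain.",
--         ("clear", lambda temp: temp < 0, None): "It might snow.",
--         (None, lambda temp: temp > 30, "none"): "It might be a hot day.",
--         ("clear", None, "windy"): "It might be a pleasant day."
--     }
--
--     for (sky_condition, temp_condition, wind_condition), forecast in rules.items():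
--         if (sky_condition is None or sky == sky_condition) and \
--            (temp_condition is None or temp_condition(temperature)) and \
--            (wind_condition is None or wind == wind_condition):
--             return forecast
--
--     return "Weather conditions unclear, please check the forecast later."
-- ===== SOURCE B (Python) =====
-- def weather_forecast(sky, temperature, wind):
--     # Decision tree: branch on wind first, then refine by sky/temperature.
--     if wind == "none":
--         if sky == "cloudy":
--             return "It might rain."
--         if sky == "clear" and temperature < 0:
--             return "It might snow."
--         if temperature > 30:
--             return "It might be a hot day."
--     elif sky == "clear":
--         if temperature < 0:
--             return "It might snow."
--         if wind == "windy":
--             return "It might be a pleasant day."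
--     return "Weather conditions unclear, please check the forecast later."
-- ===== Notes on version B (the rewrite author's own statement) =====
-- stated objective: alternative
-- what changed: Replaced the ordered rule-table scan by a decision tree that branches on wind first and then refines by sky/temperature, so no rule list exists and no rule is re-scanned.
import Mathlib
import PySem

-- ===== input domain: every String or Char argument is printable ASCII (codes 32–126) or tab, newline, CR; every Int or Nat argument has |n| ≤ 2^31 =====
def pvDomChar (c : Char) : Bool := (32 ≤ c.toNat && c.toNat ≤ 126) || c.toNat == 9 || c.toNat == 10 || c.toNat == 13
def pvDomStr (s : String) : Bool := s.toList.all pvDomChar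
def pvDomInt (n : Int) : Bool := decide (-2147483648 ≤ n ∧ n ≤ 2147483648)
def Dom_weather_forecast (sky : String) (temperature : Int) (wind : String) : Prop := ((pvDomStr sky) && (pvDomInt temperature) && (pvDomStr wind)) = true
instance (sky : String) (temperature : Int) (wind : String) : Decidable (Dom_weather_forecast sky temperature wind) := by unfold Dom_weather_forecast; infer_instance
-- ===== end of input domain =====

-- B replaces A's ordered rule-table scan by a decision tree branching on wind first (alternative decomposition, same cost).

-- ===== PORT A =====
-- Rules dict ported as an association list (insertion order) of ((sky?, temp-predicate?, wind?), forecast).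
def wfLoop (sky : String) (temperature : Int) (wind : String) :
    List ((Option String × Option (Int → Bool) × Option String) × String) → String
  | [] => "Weather conditions unclear, please check the forecast later."
  | ((sc, tc, wc), forecast) :: rest =>
      if (match sc with | none => true | some s => sky == s)
         && (match tc with | none => true | some p => p temperature)
         && (match wc with | none => true | some w => wind == w) then forecast
      else wfLoop sky temperature wind rest

def weather_forecast (sky : String) (temperature : Int) (wind : String) : String :=
  wfLoop sky temperature wind
    [((some "cloudy", none, some "none"), "It might rain."),
     ((some "clear", some (fun t => decide (t < 0)), none), "It might snow."),
     ((none, some (fun t => decide (t > 30)), some "none"), "It might be a hot day."),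
     ((some "clear", none, some "windy"), "It might be a pleasant day.")]

-- ===== PORT B =====
-- B: a decision tree, branching on wind first, then refining by sky/temperature.
def weather_forecast_alt (sky : String) (temperature : Int) (wind : String) : String :=
  if wind == "none" then
    if sky == "cloudy" then "It might rain."
    else if sky == "clear" && temperature < 0 then "It might snow."
    else if temperature > 30 then "It might be a hot day."
    else "Weather conditions unclear, please check the forecast later."
  else if sky == "clear" then
    if temperature < 0 then "It might snow."
    else if wind == "windy" then "It might be a pleasant day."
    else "Weather conditions unclear, please check the forecast later."
  else "Weather conditions unclear, please check the forecast later."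

-- ===== PRECONDITION & SPEC =====
def Spec_weather_forecast (sky : String) (temperature : Int) (wind : String) (out : String) : Prop := out = weather_forecast_alt sky temperature wind
instance (sky : String) (temperature : Int) (wind : String) (out : String) : Decidable (Spec_weather_forecast sky temperature wind out) := by unfold Spec_weather_forecast; infer_instance

-- ===== CLAIM =====
def Claim_equal_weather_forecast : Prop := ∀ (sky : String) (temperature : Int) (wind : String), Dom_weather_forecast sky temperature wind → Spec_weather_forecast sky temperature wind (weather_forecast sky temperature wind)

-- ===== LEMMAS AND PROOFS =====

-- ===== VERDICT =====
theorem weather_forecast_spec : Claim_equal_weather_forecast := by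
  intro sky temperature wind _
  unfold Spec_weather_forecast weather_forecast weather_forecast_alt
  simp only [wfLoop]
  by_cases h1 : sky == "cloudy" <;> by_cases h2 : wind == "none" <;>
    by_cases h3 : sky == "clear" <;> by_cases h4 : temperature < 0 <;>
    by_cases h5 : temperature > 30 <;> by_cases h6 : wind == "windy" <;>
    simp_all
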